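-- pv_equiv track=rewrite | github.com/faustind/puzzlesol | foregone_solution.py | solution
-- ===== SOURCE A (Python) =====
-- def solution(n):
--     a, b, p = 0, 0, 0
--     while n:
--         i = (n % 10)
--         if i == 4:
--             a += 1 * 10**p
--             b += 3 * 10**p
--         else:
--             a += i * 10 ** p
--         n, p = n//10, p+1
--
--     return a, b
-- ===== SOURCE B (Python) =====
-- def solution(n):
--     a = b = 0
--     for c in str(n):
--         if c == '4':
--             a, b = 10 * a + 1, 10 * b + 3
--         else:
--             a, b = 10 * a + ord(c) - 48, 10 * b
--     return a, b
-- ===== Notes on version B (the rewrite author's own statement) =====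
-- stated objective: alternative
-- what changed: B walks the decimal string of n once, most-significant digit first, with a Horner-style pair accumulator, instead of A's least-significant divmod-by-ten loop with a power-of-ten position accumulator; Pre_ excludes negative n, on which A loops forever while B returns.
import Mathlib
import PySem

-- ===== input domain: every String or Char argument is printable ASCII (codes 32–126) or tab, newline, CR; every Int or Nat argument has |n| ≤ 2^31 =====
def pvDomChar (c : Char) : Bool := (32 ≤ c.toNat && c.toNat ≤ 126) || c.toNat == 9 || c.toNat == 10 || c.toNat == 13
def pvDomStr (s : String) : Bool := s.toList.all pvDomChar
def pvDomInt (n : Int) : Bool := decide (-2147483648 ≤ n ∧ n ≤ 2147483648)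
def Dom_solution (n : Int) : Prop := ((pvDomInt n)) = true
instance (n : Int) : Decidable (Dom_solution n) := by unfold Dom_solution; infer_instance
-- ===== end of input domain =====

-- B replaces A's least-significant-first %10///10 loop with 10**p accumulators by a single
-- most-significant-first Horner pass over str(n); alternative decomposition, not claimed faster.

-- ===== PORT A =====
-- while n: i = n % 10; branch on i == 4; then n, p = n // 10, p + 1.
-- The exponent p only ever takes the values 0,1,2,… so it is carried as a Nat.
-- For n < 0 the Python loop never terminates (flooring division by ten stabilises at minus one): the recursion is cut
-- there (second branch) and those inputs are excluded by Pre_solution.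
def solutionGo (n a b : Int) (p : Nat) : Int × Int :=
  if n = 0 then (a, b)
  else if n < 0 then (a, b)
  else
    let i := PySem.Int.mod n 10
    if i = 4 then
      solutionGo (PySem.Int.floordiv n 10) (a + 1 * 10 ^ p) (b + 3 * 10 ^ p) (p + 1)
    else
      solutionGo (PySem.Int.floordiv n 10) (a + i * 10 ^ p) b (p + 1)
termination_by n.toNat
decreasing_by
  · rw [PySem.Int.floordiv_eq_ediv_of_pos (by omega)]; omega
  · rw [PySem.Int.floordiv_eq_ediv_of_pos (by omega)]; omega

def solution (n : Int) : Int × Int := solutionGo n 0 0 0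

-- ===== PORT B =====
-- for c in str(n): Horner step on the pair (a, b).
def solution_alt (n : Int) : Int × Int :=
  (PySem.Int.toChars n).foldl
    (fun (ab : Int × Int) c =>
      if c = '4' then (10 * ab.1 + 1, 10 * ab.2 + 3)
      else (10 * ab.1 + (c.toNat : Int) - 48, 10 * ab.2))
    (0, 0)

-- ===== PRECONDITION & SPEC =====
-- Pre_ excludes negative n: there Python A never returns (the while loop runs forever, its
-- flooring division by ten stabilising at minus one), while B returns; A returns on every n ≥ 0.
def Pre_solution (n : Int) : Prop := 0 ≤ n
instance (n : Int) : Decidable (Pre_solution n) := by unfold Pre_solution; infer_instance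
def pvWitness_solution : Int := 404

def Spec_solution (n : Int) (out : Int × Int) : Prop := out = solution_alt n
instance (n : Int) (out : Int × Int) : Decidable (Spec_solution n out) := by unfold Spec_solution; infer_instance

-- ===== CLAIM (what is proved, stated in full; the proofs are below) =====
def Claim_equal_solution : Prop := ∀ (n : Int), Dom_solution n → Pre_solution n → Spec_solution n (solution n)

-- ===== LEMMAS AND PROOFS =====

-- The common digit-map value: pvG m = (m with each digit 4 replaced by 1, 3 at each position where m has a 4).
def pvG (m : Nat) : Int × Int :=
  if m < 10 then (if m = 4 then 1 else (m : Int), if m = 4 then (3 : Int) else 0)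
  else
    let r := pvG (m / 10)
    let d := m % 10
    (10 * r.1 + (if d = 4 then 1 else (d : Int)), 10 * r.2 + (if d = 4 then (3 : Int) else 0))
termination_by m
decreasing_by omega

lemma pvG_step (m : Nat) (hm : 0 < m) :
    pvG m = (10 * (pvG (m / 10)).1 + (if m % 10 = 4 then 1 else ((m % 10 : Nat) : Int)),
             10 * (pvG (m / 10)).2 + (if m % 10 = 4 then (3 : Int) else 0)) := by
  rw [pvG]
  by_cases h : m < 10
  · have h10 : m / 10 = 0 := by omega
    have hmod : m % 10 = m := by omega
    simp [h, h10, hmod, pvG]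
  · simp [h]

lemma pvG_zero : pvG 0 = (0, 0) := by rw [pvG]; norm_num

-- A's loop computes pvG shifted by the power accumulator.
lemma solutionGo_eq (m : Nat) : ∀ (a b : Int) (p : Nat),
    solutionGo (m : Int) a b p = (a + (pvG m).1 * 10 ^ p, b + (pvG m).2 * 10 ^ p) := by
  induction m using Nat.strong_induction_on with
  | _ m ih =>
    intro a b p
    by_cases h0 : m = 0
    · subst h0
      rw [solutionGo, pvG_zero]
      norm_num
    · rw [solutionGo]
      have hne : (m : Int) ≠ 0 := by exact_mod_cast h0
      have hnneg : ¬ ((m : Int) < 0) := by omega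
      have hmod : PySem.Int.mod (m : Int) 10 = ((m % 10 : Nat) : Int) := by
        exact_mod_cast PySem.Int.mod_natCast m 10
      have hdiv : PySem.Int.floordiv (m : Int) 10 = ((m / 10 : Nat) : Int) := by
        exact_mod_cast PySem.Int.floordiv_natCast m 10
      have hlt : m / 10 < m := by omega
      rw [pvG_step m (by omega), if_neg hne, if_neg hnneg]
      simp only [hmod, hdiv]
      by_cases h4 : m % 10 = 4
      · have hc : ((m % 10 : Nat) : Int) = 4 := by exact_mod_cast h4
        rw [if_pos hc, if_pos h4, if_pos h4, ih (m / 10) hlt]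
        simp only [Prod.mk.injEq]
        constructor <;> ring
      · have hc : ((m % 10 : Nat) : Int) ≠ 4 := fun hx => h4 (by exact_mod_cast hx)
        rw [if_neg hc, if_neg h4, if_neg h4, ih (m / 10) hlt]
        simp only [Prod.mk.injEq]
        constructor <;> ring

-- Nat.toDigits plumbing: accumulator append and fuel irrelevance.
lemma toDigitsCore_append (b : Nat) : ∀ (f m : Nat) (l : List Char),
    Nat.toDigitsCore b f m l = Nat.toDigitsCore b f m [] ++ l := by
  intro f
  induction f with
  | zero => intro m l; simp [Nat.toDigitsCore]
  | succ g ih =>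
    intro m l
    simp only [Nat.toDigitsCore]
    by_cases h : m / b = 0
    · simp [h]
    · simp only [h, if_false]
      rw [ih (m / b) (Nat.digitChar (m % b) :: l), ih (m / b) [Nat.digitChar (m % b)]]
      simp

lemma toDigitsCore_fuel : ∀ (m f f' : Nat), m < f → m < f' →
    Nat.toDigitsCore 10 f m [] = Nat.toDigitsCore 10 f' m [] := by
  intro m
  induction m using Nat.strong_induction_on with
  | _ m ih =>
    intro f f' hf hf'
    obtain ⟨g, rfl⟩ : ∃ g, f = g + 1 := ⟨f - 1, by omega⟩
    obtain ⟨g', rfl⟩ : ∃ g', f' = g' + 1 := ⟨f' - 1, by omega⟩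
    simp only [Nat.toDigitsCore]
    by_cases h : m / 10 = 0
    · simp [h]
    · simp only [h, if_false]
      rw [toDigitsCore_append 10 g, toDigitsCore_append 10 g']
      rw [ih (m / 10) (by omega) g g' (by omega) (by omega)]

lemma toDigits_small (m : Nat) (h : m < 10) : Nat.toDigits 10 m = [Nat.digitChar m] := by
  have h0 : m / 10 = 0 := by omega
  have hm : m % 10 = m := by omega
  simp [Nat.toDigits, Nat.toDigitsCore, h0, hm]

lemma toDigits_step (m : Nat) (h : 10 ≤ m) :
    Nat.toDigits 10 m = Nat.toDigits 10 (m / 10) ++ [Nat.digitChar (m % 10)] := by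
  have h0 : m / 10 ≠ 0 := by omega
  conv_lhs => rw [Nat.toDigits, Nat.toDigitsCore]
  rw [if_neg h0, toDigitsCore_append 10 m,
      toDigitsCore_fuel (m / 10) m (m / 10 + 1) (by omega) (by omega)]
  rfl

-- B's Horner step on a digit character.
lemma step_digitChar (a b : Int) (d : Nat) (hd : d < 10) :
    (if Nat.digitChar d = '4' then (10 * a + 1, 10 * b + 3)
      else (10 * a + ((Nat.digitChar d).toNat : Int) - 48, 10 * b))
    = (10 * a + (if d = 4 then 1 else (d : Int)), 10 * b + (if d = 4 then (3 : Int) else 0)) := by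
  interval_cases d <;> simp [Nat.digitChar] <;> omega

-- B's fold over the digits of m computes pvG m.
lemma foldl_toDigits (m : Nat) :
    (Nat.toDigits 10 m).foldl
      (fun (ab : Int × Int) c =>
        if c = '4' then (10 * ab.1 + 1, 10 * ab.2 + 3)
        else (10 * ab.1 + (c.toNat : Int) - 48, 10 * ab.2)) (0, 0) = pvG m := by
  induction m using Nat.strong_induction_on with
  | _ m ih =>
    by_cases h : m < 10
    · rw [toDigits_small m h, pvG]
      simp only [List.foldl_cons, List.foldl_nil, h, if_true]
      rw [step_digitChar 0 0 m h]
      norm_num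
    · rw [toDigits_step m (by omega), List.foldl_append]
      rw [ih (m / 10) (by omega)]
      simp only [List.foldl_cons, List.foldl_nil]
      rw [step_digitChar (pvG (m / 10)).1 (pvG (m / 10)).2 (m % 10) (by omega),
          pvG_step m (by omega)]

-- ===== VERDICT (by name: the statement is the Claim_ definition above) =====
theorem solution_spec : Claim_equal_solution := by
  intro n _ hpre
  unfold Spec_solution solution solution_alt
  obtain ⟨m, rfl⟩ := Int.eq_ofNat_of_zero_le hpre
  have htc : PySem.Int.toChars (m : Int) = Nat.toDigits 10 m := by
    simp [PySem.Int.toChars]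
  rw [htc, foldl_toDigits, solutionGo_eq]
  norm_num
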